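-- pv_equiv track=rewrite | github.com/phasetr/AlgorithmsAndDataStructureByFSharp | AtCoder/DP/U04.py | solve
-- ===== SOURCE A (Python) =====
-- def solve(N,A):
--     m = 1 << N
--     dp = [0] * m
--     cost = [0] * m
--     for s in range(m):
--         for i in range(N):
--             for j in range(i):
--                 if (s >> i & 1) and (s >> j & 1):
--                     cost[s] += A[i][j]
--
--     for s in range(m):
--         u = s
--         while u:
--             dp[s] = max(dp[s], dp[s - u] + cost[u])
--             u = (u - 1) & s
--
--     return dp[m-1]
-- ===== SOURCE B (Python) =====
-- def solve(N, A):
--     m = 1 << N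
--     cost = [0] * m
--     for s in range(1, m):
--         low = 0
--         t = s
--         while t & 1 == 0:
--             t >>= 1
--             low += 1
--         c = cost[s ^ (1 << low)]
--         for j in range(low + 1, N):
--             if (s >> j) & 1:
--                 c += A[j][low]
--         cost[s] = c
--     dp = [0] * m
--     for s in range(m):
--         u = s
--         while u:
--             dp[s] = max(dp[s], dp[s - u] + cost[u])
--             u = (u - 1) & s
--     return dp[m - 1]
-- ===== Notes on version B (the rewrite author's own statement) =====
-- stated objective: faster
-- what changed: B builds the cost table incrementally via a lowest-set-bit recurrence (cost[s] = cost[s without its lowest bit] + sum of A[j][low] over the other set bits), replacing A's O(N^2) pair rescan per subset; the phase-2 submask DP is kept identical.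
import Mathlib
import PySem

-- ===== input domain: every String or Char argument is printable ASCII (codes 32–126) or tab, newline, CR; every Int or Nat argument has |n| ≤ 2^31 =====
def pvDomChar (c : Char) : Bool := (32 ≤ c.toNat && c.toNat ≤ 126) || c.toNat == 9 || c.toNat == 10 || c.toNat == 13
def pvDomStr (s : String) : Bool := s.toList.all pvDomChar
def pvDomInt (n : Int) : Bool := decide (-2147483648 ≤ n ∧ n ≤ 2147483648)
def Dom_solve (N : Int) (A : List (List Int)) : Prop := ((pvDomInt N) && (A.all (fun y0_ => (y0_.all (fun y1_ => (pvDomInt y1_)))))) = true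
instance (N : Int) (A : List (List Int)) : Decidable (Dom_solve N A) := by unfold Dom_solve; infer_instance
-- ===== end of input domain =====

-- B replaces A's O(2^N·N^2) per-subset pair rescan for the cost table by an incremental
-- lowest-set-bit recurrence (cost[s] = cost[s minus its lowest bit] + the A[j][low] of the
-- other set bits j), keeping the identical phase-2 submask DP.

-- ===== PORT A =====
-- A[i][j]: under Pre_ the indices are always in range, so getD is exact there
def pvAGet (A : List (List Int)) (i j : Nat) : Int := (A.getD i []).getD j 0

-- cost[s] of A: the nested 'for i in range(N): for j in range(i)' accumulation
def costEntryA (n : Nat) (A : List (List Int)) (s : Nat) : Int :=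
  (List.range n).foldl (fun c i =>
    (List.range i).foldl (fun c j =>
      if (s >>> i) &&& 1 = 1 ∧ (s >>> j) &&& 1 = 1 then c + pvAGet A i j else c) c) 0

-- the 'while u: dp[s] = max(dp[s], dp[s-u]+cost[u]); u = (u-1)&s' loop (identical in A's and B's Python)
def pvSubLoop (dpArr : List Int) (cost : Nat → Int) (s u : Nat) (acc : Int) : Int :=
  if h : u = 0 then acc
  else pvSubLoop dpArr cost s ((u - 1) &&& s) (max acc (dpArr.getD (s - u) 0 + cost u))
termination_by u
decreasing_by exact Nat.lt_of_le_of_lt Nat.and_le_left (Nat.sub_lt (Nat.pos_of_ne_zero h) one_pos)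

-- phase 2, identical in A's and B's Python: dp built left to right over s in range(m)
def pvDpPhase (cost : Nat → Int) (m : Nat) : List Int :=
  (List.range m).foldl (fun arr s => arr ++ [pvSubLoop arr cost s s 0]) []

def solve (N : Int) (A : List (List Int)) : Int :=
  let n := N.toNat
  let m := 2 ^ n
  let cost := (List.range m).map (costEntryA n A)
  let dp := pvDpPhase (fun u => cost.getD u 0) m
  dp.getD (m - 1) 0

-- ===== PORT B =====
-- 'low = 0; t = s; while t & 1 == 0: t >>= 1; low += 1' (the t = 0 test is only a totality guard; s > 0 at the call)
def pvLowAux (t low : Nat) : Nat :=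
  if h : t &&& 1 = 0 ∧ t ≠ 0 then pvLowAux (t / 2) (low + 1) else low
termination_by t
decreasing_by exact Nat.div_lt_self (Nat.pos_of_ne_zero h.2) one_lt_two

-- B's incremental cost table: cost[s] = cost[s ^ lowbit] + sum of A[j][low] over the other set bits j
def pvCostB (n : Nat) (A : List (List Int)) (m : Nat) : List Int :=
  (List.range m).foldl (fun arr s =>
    arr ++ [if s = 0 then 0
      else
        let low := pvLowAux s 0
        (List.range' (low + 1) (n - (low + 1))).foldl
          (fun c j => if (s >>> j) &&& 1 = 1 then c + pvAGet A j low else c)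
          (arr.getD (s ^^^ (1 <<< low)) 0)]) []

def solve_alt (N : Int) (A : List (List Int)) : Int :=
  let n := N.toNat
  let m := 2 ^ n
  let cost := pvCostB n A m
  let dp := pvDpPhase (fun u => cost.getD u 0) m
  dp.getD (m - 1) 0

-- ===== PRECONDITION & SPEC =====
-- Pre_ excludes exactly the inputs where Python A raises: N < 0 (ValueError on 1 << N) and
-- matrices too short for the accessed entries A[i][j], 1 ≤ i < N, j < i (IndexError).
def Pre_solve (N : Int) (A : List (List Int)) : Prop :=
  0 ≤ N ∧ (N ≤ 1 ∨ (N ≤ (A.length : Int) ∧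
    ∀ i : Nat, i < A.length → 1 ≤ i → (i : Int) < N → i ≤ (A.getD i []).length))
instance (N : Int) (A : List (List Int)) : Decidable (Pre_solve N A) := by
  unfold Pre_solve; infer_instance

def pvWitness_solve : Int × List (List Int) := (2, [[], [5]])

def Spec_solve (N : Int) (A : List (List Int)) (out : Int) : Prop := out = solve_alt N A
instance (N : Int) (A : List (List Int)) (out : Int) : Decidable (Spec_solve N A out) := by unfold Spec_solve; infer_instance

-- ===== CLAIM (what is proved, stated in full; the proofs are below) =====
def Claim_equal_solve : Prop := ∀ (N : Int) (A : List (List Int)), Dom_solve N A → Pre_solve N A → Spec_solve N A (solve N A)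

-- ===== LEMMAS AND PROOFS =====

-- the common mathematical value of both cost tables: the sum of A[i][j] over set-bit pairs j < i
def pvP (n : Nat) (A : List (List Int)) (s : Nat) : Int :=
  ∑ i ∈ Finset.range n, ∑ j ∈ Finset.range i,
    (if s.testBit i = true ∧ s.testBit j = true then pvAGet A i j else 0)

theorem pvBit_iff (s i : Nat) : ((s >>> i) &&& 1 = 1) ↔ s.testBit i = true := by
  rw [Nat.testBit]
  have h1 : 1 &&& (s >>> i) = (s >>> i) &&& 1 := Nat.and_comm _ _
  have h2 : (s >>> i) &&& 1 ≤ 1 := Nat.and_le_right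
  rw [h1]
  simp only [bne_iff_ne, ne_eq]
  omega

theorem pvFoldl_if_sum (p : Nat → Prop) [DecidablePred p] (a : Nat → Int) :
    ∀ (l : List Nat) (c : Int),
      l.foldl (fun c j => if p j then c + a j else c) c
        = c + (l.map (fun j => if p j then a j else 0)).sum := by
  intro l
  induction l with
  | nil => intro c; simp
  | cons x xs ih =>
    intro c
    simp only [List.foldl_cons, List.map_cons, List.sum_cons]
    by_cases h : p x
    · rw [if_pos h, if_pos h, ih]; omega
    · rw [if_neg h, if_neg h, ih]; omega

theorem pvRange_map_sum (g : Nat → Int) : ∀ n : Nat,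
    ((List.range n).map g).sum = ∑ i ∈ Finset.range n, g i := by
  intro n
  induction n with
  | zero => simp
  | succ n ih =>
    rw [List.range_succ, List.map_append, List.sum_append, Finset.sum_range_succ, ih]; simp

theorem pvMap_range'_sum (g : Nat → Int) (s : Nat) : ∀ len : Nat,
    ((List.range' s len).map g).sum = ∑ j ∈ Finset.range len, g (s + j) := by
  intro len
  induction len with
  | zero => simp
  | succ len ih =>
    rw [List.range'_concat, List.map_append, List.sum_append, Finset.sum_range_succ, ih]
    simp

theorem pvSum_range_tail (low : Nat) (h : Nat → Int) (hz : ∀ i ≤ low, h i = 0) :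
    ∀ n : Nat, ∑ i ∈ Finset.range n, h i = ∑ j ∈ Finset.range (n - (low + 1)), h (low + 1 + j) := by
  intro n
  induction n with
  | zero => simp
  | succ n ih =>
    by_cases hn : n ≤ low
    · have e : n + 1 - (low + 1) = 0 := by omega
      rw [e]
      simp only [Finset.range_zero, Finset.sum_empty]
      exact Finset.sum_eq_zero fun i hi => hz i (by simp only [Finset.mem_range] at hi; omega)
    · have e : n + 1 - (low + 1) = (n - (low + 1)) + 1 := by omega
      rw [Finset.sum_range_succ, ih, e, Finset.sum_range_succ]
      have e2 : low + 1 + (n - (low + 1)) = n := by omega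
      rw [e2]

theorem pvCostA_eq (A : List (List Int)) (s : Nat) : ∀ n : Nat,
    costEntryA n A s = pvP n A s := by
  intro n
  induction n with
  | zero => simp [costEntryA, pvP]
  | succ n ih =>
    have hps : pvP (n + 1) A s = pvP n A s
        + ∑ j ∈ Finset.range n, (if s.testBit n = true ∧ s.testBit j = true then pvAGet A n j else 0) := by
      unfold pvP; exact Finset.sum_range_succ _ n
    simp only [costEntryA, List.range_succ, List.foldl_append, List.foldl_cons, List.foldl_nil]
    unfold costEntryA at ih
    rw [ih, pvFoldl_if_sum (fun j => (s >>> n) &&& 1 = 1 ∧ (s >>> j) &&& 1 = 1)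
      (fun j => pvAGet A n j), hps]
    congr 1
    rw [pvRange_map_sum]
    apply Finset.sum_congr rfl
    intro j hj
    by_cases h1 : s.testBit n = true ∧ s.testBit j = true
    · rw [if_pos ⟨(pvBit_iff s n).mpr h1.1, (pvBit_iff s j).mpr h1.2⟩, if_pos h1]
    · rw [if_neg (fun hc => h1 ⟨(pvBit_iff s n).mp hc.1, (pvBit_iff s j).mp hc.2⟩), if_neg h1]

-- pvLowAux accumulates: pvLowAux t l = pvLowAux t 0 + l
theorem pvLowAux_shift (t : Nat) : ∀ l : Nat, pvLowAux t l = pvLowAux t 0 + l := by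
  induction t using Nat.strong_induction_on with
  | _ t ih =>
    intro l
    by_cases h : t &&& 1 = 0 ∧ t ≠ 0
    · have e1 : pvLowAux t l = pvLowAux (t / 2) (l + 1) := by rw [pvLowAux, dif_pos h]
      have e0 : pvLowAux t 0 = pvLowAux (t / 2) 1 := by rw [pvLowAux, dif_pos h]
      rw [e1, e0, ih (t / 2) (Nat.div_lt_self (Nat.pos_of_ne_zero h.2) one_lt_two) (l + 1),
        ih (t / 2) (Nat.div_lt_self (Nat.pos_of_ne_zero h.2) one_lt_two) 1]
      omega
    · have e1 : pvLowAux t l = l := by rw [pvLowAux, dif_neg h]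
      have e0 : pvLowAux t 0 = 0 := by rw [pvLowAux, dif_neg h]
      rw [e1, e0]; omega

-- pvLowAux t 0 is the lowest set bit of t (for t ≠ 0)
theorem pvLowAux_spec (t : Nat) (ht : t ≠ 0) :
    t.testBit (pvLowAux t 0) = true ∧ ∀ k < pvLowAux t 0, t.testBit k = false := by
  induction t using Nat.strong_induction_on with
  | _ t ih =>
    by_cases h : t &&& 1 = 0 ∧ t ≠ 0
    · have e0 : pvLowAux t 0 = pvLowAux (t / 2) 0 + 1 := by
        rw [pvLowAux, dif_pos h, pvLowAux_shift]
      have hmod : t % 2 = 0 := by have := h.1; rwa [Nat.and_one_is_mod] at this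
      have ht2 : t / 2 ≠ 0 := by omega
      obtain ⟨h1, h2⟩ := ih (t / 2) (Nat.div_lt_self (Nat.pos_of_ne_zero h.2) one_lt_two) ht2
      rw [e0]
      refine ⟨by rw [Nat.testBit_add_one]; exact h1, ?_⟩
      intro k hk
      cases k with
      | zero => simp [Nat.testBit_zero, hmod]
      | succ k => rw [Nat.testBit_add_one]; exact h2 k (by omega)
    · have e0 : pvLowAux t 0 = 0 := by rw [pvLowAux, dif_neg h]
      have hmod : t % 2 = 1 := by
        rcases Nat.mod_two_eq_zero_or_one t with h0 | h1
        · exact absurd ⟨by rwa [Nat.and_one_is_mod], ht⟩ h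
        · exact h1
      rw [e0]
      exact ⟨by simp [Nat.testBit_zero, hmod], fun k hk => by omega⟩

-- the key identity: clearing the lowest set bit 'low' of s removes exactly the pairs (i, low)
theorem pvKey (n : Nat) (A : List (List Int)) (s low : Nat)
    (hbit : s.testBit low = true) (hlow : ∀ k < low, s.testBit k = false) :
    pvP n A s = pvP n A (s ^^^ (1 <<< low))
      + ∑ i ∈ Finset.range n, (if low < i ∧ s.testBit i = true then pvAGet A i low else 0) := by
  have hbit' : ∀ k, (s ^^^ (1 <<< low)).testBit k = if k = low then false else s.testBit k := by
    intro k
    rw [Nat.one_shiftLeft, Nat.testBit_xor, Nat.testBit_two_pow]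
    by_cases hk : k = low
    · subst hk; simp [hbit]
    · simp [Ne.symm hk, hk]
  unfold pvP
  rw [← Finset.sum_add_distrib]
  apply Finset.sum_congr rfl
  intro i hi
  have hterm : ∀ j ∈ Finset.range i,
      (if s.testBit i = true ∧ s.testBit j = true then pvAGet A i j else 0)
        = (if (s ^^^ (1 <<< low)).testBit i = true ∧ (s ^^^ (1 <<< low)).testBit j = true then pvAGet A i j else 0)
          + (if j = low ∧ s.testBit i = true then pvAGet A i low else 0) := by
    intro j hj
    rw [Finset.mem_range] at hj
    by_cases hjl : j = low
    · subst hjl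
      have hil : i ≠ j := by omega
      simp [hbit' j, hbit' i, hil, hbit]
    · by_cases hil : i = low
      · subst hil
        have hbj : s.testBit j = false := hlow j hj
        simp [hbit' j, hbit' i, hjl, hbj]
      · simp [hbit' j, hbit' i, hjl, hil]
  rw [Finset.sum_congr rfl hterm, Finset.sum_add_distrib]
  congr 1
  by_cases hi' : s.testBit i = true
  · simp only [hi', and_true]
    rw [Finset.sum_ite_eq' (Finset.range i) low (fun _ => pvAGet A i low)]
    simp [Finset.mem_range]
  · simp [hi']

theorem pvGetD_map_range (F : Nat → Int) (k x : Nat) (hx : x < k) :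
    ((List.range k).map F).getD x 0 = F x := by
  rw [List.getD_eq_getElem?_getD]
  simp [hx]

-- B's cost table equals pvP entrywise
theorem pvCostB_inv (n : Nat) (A : List (List Int)) : ∀ k, k ≤ 2 ^ n →
    (List.range k).foldl (fun arr s =>
      arr ++ [if s = 0 then 0
        else
          let low := pvLowAux s 0
          (List.range' (low + 1) (n - (low + 1))).foldl
            (fun c j => if (s >>> j) &&& 1 = 1 then c + pvAGet A j low else c)
            (arr.getD (s ^^^ (1 <<< low)) 0)]) []
      = (List.range k).map (pvP n A) := by
  intro k
  induction k with
  | zero => simp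
  | succ k ih =>
    intro hk
    simp only [List.range_succ, List.foldl_append, List.foldl_cons, List.foldl_nil,
      List.map_append, List.map_cons, List.map_nil]
    rw [ih (by omega)]
    congr 1
    by_cases hk0 : k = 0
    · subst hk0; simp [pvP, Nat.zero_testBit]
    · simp only [if_neg hk0]
      obtain ⟨hb, hl⟩ := pvLowAux_spec k hk0
      set low := pvLowAux k 0 with hlowdef
      have hxor : ∀ m', (k ^^^ (1 <<< low)).testBit m' = if m' = low then false else k.testBit m' := by
        intro m'
        rw [Nat.one_shiftLeft, Nat.testBit_xor, Nat.testBit_two_pow]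
        by_cases hm : m' = low
        · subst hm; simp [hb]
        · simp [Ne.symm hm, hm]
      have hlt : k ^^^ (1 <<< low) < k := by
        refine Nat.lt_of_testBit low (by rw [hxor]; simp) hb fun j hj => ?_
        rw [hxor]; simp [Nat.ne_of_gt hj]
      rw [pvGetD_map_range _ _ _ hlt,
        pvFoldl_if_sum (fun j => (k >>> j) &&& 1 = 1) (fun j => pvAGet A j low),
        pvMap_range'_sum (fun j => if (k >>> j) &&& 1 = 1 then pvAGet A j low else 0) (low + 1)]
      have hz : ∀ i ≤ low, (if low < i ∧ k.testBit i = true then pvAGet A i low else 0) = 0 := by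
        intro i hi; rw [if_neg (fun hc => by omega)]
      rw [pvKey n A k low hb hl,
        pvSum_range_tail low (fun i => if low < i ∧ k.testBit i = true then pvAGet A i low else 0) hz n]
      congr 1
      congr 1
      apply Finset.sum_congr rfl
      intro j hj
      by_cases hbj : k.testBit (low + 1 + j) = true
      · rw [if_pos ((pvBit_iff k (low + 1 + j)).mpr hbj), if_pos ⟨by omega, hbj⟩]
      · rw [if_neg (fun hc => hbj ((pvBit_iff k (low + 1 + j)).mp hc)),
          if_neg (fun hc => hbj hc.2)]

-- the cost arguments of pvSubLoop stay ≤ s, so cost functions agreeing up to s give equal results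
theorem pvSubLoop_congr (arr : List Int) (c1 c2 : Nat → Int) (s : Nat)
    (h : ∀ v ≤ s, c1 v = c2 v) :
    ∀ u, u ≤ s → ∀ acc, pvSubLoop arr c1 s u acc = pvSubLoop arr c2 s u acc := by
  intro u
  induction u using Nat.strong_induction_on with
  | _ u ih =>
    intro hu acc
    by_cases h0 : u = 0
    · have e1 : pvSubLoop arr c1 s u acc = acc := by rw [pvSubLoop, dif_pos h0]
      have e2 : pvSubLoop arr c2 s u acc = acc := by rw [pvSubLoop, dif_pos h0]
      rw [e1, e2]
    · have e1 : pvSubLoop arr c1 s u acc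
          = pvSubLoop arr c1 s ((u - 1) &&& s) (max acc (arr.getD (s - u) 0 + c1 u)) := by
        rw [pvSubLoop]; rw [dif_neg h0]
      have e2 : pvSubLoop arr c2 s u acc
          = pvSubLoop arr c2 s ((u - 1) &&& s) (max acc (arr.getD (s - u) 0 + c2 u)) := by
        rw [pvSubLoop]; rw [dif_neg h0]
      rw [e1, e2, h u hu]
      exact ih ((u - 1) &&& s)
        (Nat.lt_of_le_of_lt Nat.and_le_left (Nat.sub_lt (Nat.pos_of_ne_zero h0) one_pos))
        Nat.and_le_right _

theorem pvDpPhase_congr (c1 c2 : Nat → Int) (m : Nat) (h : ∀ v < m, c1 v = c2 v) :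
    pvDpPhase c1 m = pvDpPhase c2 m := by
  unfold pvDpPhase
  suffices hs : ∀ k, k ≤ m →
      (List.range k).foldl (fun arr s => arr ++ [pvSubLoop arr c1 s s 0]) []
        = (List.range k).foldl (fun arr s => arr ++ [pvSubLoop arr c2 s s 0]) [] by
    exact hs m le_rfl
  intro k
  induction k with
  | zero => simp
  | succ k ih =>
    intro hk
    rw [List.range_succ, List.foldl_append, List.foldl_append, List.foldl_cons, List.foldl_cons,
      List.foldl_nil, List.foldl_nil, ih (by omega),
      pvSubLoop_congr _ c1 c2 k (fun v hv => h v (by omega)) k le_rfl]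

theorem pvMain (N : Int) (A : List (List Int)) : solve N A = solve_alt N A := by
  simp only [solve, solve_alt]
  have h : ∀ v < 2 ^ N.toNat,
      ((List.range (2 ^ N.toNat)).map (costEntryA N.toNat A)).getD v 0
        = (pvCostB N.toNat A (2 ^ N.toNat)).getD v 0 := by
    intro v hv
    rw [pvGetD_map_range _ _ _ hv, pvCostA_eq A v N.toNat]
    unfold pvCostB
    rw [pvCostB_inv N.toNat A (2 ^ N.toNat) le_rfl, pvGetD_map_range _ _ _ hv]
  rw [pvDpPhase_congr _ _ _ h]

-- ===== VERDICT (by name: the statement is the Claim_ definition above) =====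
theorem solve_spec : Claim_equal_solve := by
  intro N A _ _
  unfold Spec_solve
  exact pvMain N A
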